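-- pv_equiv track=rewrite | github.com/UnAnsav/Chess | chess_p.py | letter_to_number
-- ===== SOURCE A (Python) =====
-- def letter_to_number(letter):   # e4 -> 54
--
--     letters = {
--         10: "a",
--         20: "b",
--         30: "c",
--         40: "d",
--         50: "e",
--         60: "f",
--         70: "g",
--         80: "h",
--     }
--
--     for i in range(10, len(letters) * 10 + 10, 10):
--         if letters[i] == letter[0]:
--             letter = str(i)[0] + letter[-1]
--
--
--     return int(letter)
-- ===== SOURCE B (Python) =====
-- def letter_to_number(letter):   # e4 -> 54
--     first = letter[0]
--     if "a" <= first <= "h":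
--         col = ord(first) - ord("a") + 1
--         return int(str(col) + letter[-1])
--     return int(letter)
-- ===== Notes on version B (the rewrite author's own statement) =====
-- stated objective: idiomatic
-- what changed: Replaces the dict table and the range-loop of repeated lookups with a single closed-form arithmetic computation (ord(first)-ord('a')+1) guarded by one range test.
-- outside the precondition, e.g. on letter_to_number('a'): A raises ValueError, B raises ValueError; on letter_to_number(''): A raises IndexError, B raises IndexError
import Mathlib
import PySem

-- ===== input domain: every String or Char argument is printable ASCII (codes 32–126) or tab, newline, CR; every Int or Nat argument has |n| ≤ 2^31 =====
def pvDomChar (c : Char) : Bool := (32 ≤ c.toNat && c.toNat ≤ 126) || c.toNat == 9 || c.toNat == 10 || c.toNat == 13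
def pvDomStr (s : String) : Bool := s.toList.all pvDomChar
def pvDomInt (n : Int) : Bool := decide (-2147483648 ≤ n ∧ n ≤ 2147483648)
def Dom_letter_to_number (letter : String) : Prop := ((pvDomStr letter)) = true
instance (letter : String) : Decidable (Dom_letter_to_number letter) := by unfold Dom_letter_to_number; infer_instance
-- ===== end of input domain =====

-- B replaces A's dict table and its range-loop of lookups by one closed-form
-- arithmetic computation (idiomatic; same exact values wherever A returns).

-- ===== PORT A =====
-- the dict literal 'letters'
def lettersA : PySem.Dict Int String :=
  PySem.Dict.ofList [(10, "a"), (20, "b"), (30, "c"), (40, "d"),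
                     (50, "e"), (60, "f"), (70, "g"), (80, "h")]

-- one iteration of A's 'for i in range(10, len(letters)*10+10, 10)' body
-- (letter[0] / letter[-1] raise IndexError on the empty string: none-branch is
-- junk, excluded by Pre_)
def aStep (l : List Char) (i : Int) : List Char :=
  match PySem.List.pyGet? l 0 with
  | none => l
  | some c0 =>
    if (PySem.Dict.getD lettersA i "").toList == [c0] then
      match PySem.List.pyGet? (PySem.Int.toStr i).toList 0, PySem.List.pyGet? l (-1) with
      | some d, some lst => [d, lst]
      | _, _ => l
    else l

def letter_to_number (letter : String) : Int :=
  let l := (PySem.List.pyRange 10 (lettersA.size * 10 + 10) 10).foldl aStep letter.toList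
  (PySem.Int.ofChars? l).getD 0   -- int(letter); none = ValueError, excluded by Pre_

-- ===== PORT B =====
def letter_to_number_alt (letter : String) : Int :=
  match PySem.List.pyGet? letter.toList 0 with
  | none => 0   -- IndexError on empty input, excluded by Pre_
  | some first =>
    if 'a' ≤ first ∧ first ≤ 'h' then
      let col : Int := (first.toNat : Int) - 97 + 1   -- ord(first) - ord('a') + 1
      match PySem.List.pyGet? letter.toList (-1) with
      | some lst => (PySem.Int.ofChars? ((PySem.Int.toStr col).toList ++ [lst])).getD 0
      | none => 0
    else (PySem.Int.ofStr? letter).getD 0   -- int(letter); none = ValueError, excluded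

-- ===== PRECONDITION & SPEC =====
-- the string A finally passes to int(): letter with an a–h first character
-- replaced by the corresponding column digit paired with the last character
def pvPreTarget : List Char → List Char
  | [] => []
  | c :: rest =>
    if 'a' ≤ c ∧ c ≤ 'h' then [Char.ofNat (c.toNat - 48), (c :: rest).getLast (by simp)]
    else c :: rest

-- Pre_ excludes exactly the inputs on which A raises: the empty string
-- (IndexError) and strings whose final int() argument fails to parse (ValueError).
def Pre_letter_to_number (letter : String) : Prop :=
  letter.toList ≠ [] ∧ (PySem.Int.ofChars? (pvPreTarget letter.toList)).isSome = true
instance (letter : String) : Decidable (Pre_letter_to_number letter) := by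
  unfold Pre_letter_to_number; infer_instance

def pvWitness_letter_to_number : String := "e4"

def Spec_letter_to_number (letter : String) (out : Int) : Prop := out = letter_to_number_alt letter
instance (letter : String) (out : Int) : Decidable (Spec_letter_to_number letter out) := by
  unfold Spec_letter_to_number; infer_instance

-- ===== CLAIM (what is proved, stated in full; the proofs are below) =====
def Claim_equal_letter_to_number : Prop := ∀ (letter : String), Dom_letter_to_number letter → Pre_letter_to_number letter → Spec_letter_to_number letter (letter_to_number letter)


-- ===== LEMMAS AND PROOFS =====

theorem char_eight (c : Char) (h1 : 'a' ≤ c) (h2 : c ≤ 'h') :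
    c='a'∨c='b'∨c='c'∨c='d'∨c='e'∨c='f'∨c='g'∨c='h' := by
  have l1 : 97 ≤ c.toNat := by
    rw [Char.le_def] at h1; exact UInt32.le_iff_toNat_le.mp h1
  have l2 : c.toNat ≤ 104 := by
    rw [Char.le_def] at h2; exact UInt32.le_iff_toNat_le.mp h2
  have hofnat : Char.ofNat c.toNat = c := Char.ofNat_toNat c
  interval_cases h : c.toNat <;> rw [← hofnat] <;> decide

theorem aStep_cons (c : Char) (rest : List Char) (i : Int) :
    aStep (c :: rest) i =
      if (PySem.Dict.getD lettersA i "").toList = [c] then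
        match PySem.List.pyGet? (PySem.Int.toStr i).toList 0, PySem.List.pyGet? (c :: rest) (-1) with
        | some d, some lst => [d, lst]
        | _, _ => c :: rest
      else c :: rest := by
  unfold aStep
  rw [PySem.List.pyGet?_zero_cons]
  simp

theorem gd10 : (PySem.Dict.getD lettersA 10 "").toList = ['a'] := by decide
theorem gd20 : (PySem.Dict.getD lettersA 20 "").toList = ['b'] := by decide
theorem gd30 : (PySem.Dict.getD lettersA 30 "").toList = ['c'] := by decide
theorem gd40 : (PySem.Dict.getD lettersA 40 "").toList = ['d'] := by decide
theorem gd50 : (PySem.Dict.getD lettersA 50 "").toList = ['e'] := by decide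
theorem gd60 : (PySem.Dict.getD lettersA 60 "").toList = ['f'] := by decide
theorem gd70 : (PySem.Dict.getD lettersA 70 "").toList = ['g'] := by decide
theorem gd80 : (PySem.Dict.getD lettersA 80 "").toList = ['h'] := by decide
theorem ts10 : PySem.List.pyGet? (PySem.Int.toChars 10) 0 = some '1' := by decide
theorem ts20 : PySem.List.pyGet? (PySem.Int.toChars 20) 0 = some '2' := by decide
theorem ts30 : PySem.List.pyGet? (PySem.Int.toChars 30) 0 = some '3' := by decide
theorem ts40 : PySem.List.pyGet? (PySem.Int.toChars 40) 0 = some '4' := by decide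
theorem ts50 : PySem.List.pyGet? (PySem.Int.toChars 50) 0 = some '5' := by decide
theorem ts60 : PySem.List.pyGet? (PySem.Int.toChars 60) 0 = some '6' := by decide
theorem ts70 : PySem.List.pyGet? (PySem.Int.toChars 70) 0 = some '7' := by decide
theorem ts80 : PySem.List.pyGet? (PySem.Int.toChars 80) 0 = some '8' := by decide

theorem ocnil : PySem.Int.ofChars? ([] : List Char) = none := by decide
theorem tc1 : PySem.Int.toChars 1 = ['1'] := by decide
theorem tc2 : PySem.Int.toChars 2 = ['2'] := by decide
theorem tc3 : PySem.Int.toChars 3 = ['3'] := by decide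
theorem tc4 : PySem.Int.toChars 4 = ['4'] := by decide
theorem tc5 : PySem.Int.toChars 5 = ['5'] := by decide
theorem tc6 : PySem.Int.toChars 6 = ['6'] := by decide
theorem tc7 : PySem.Int.toChars 7 = ['7'] := by decide
theorem tc8 : PySem.Int.toChars 8 = ['8'] := by decide

theorem core_eq (letter : String) :
    letter_to_number letter = letter_to_number_alt letter := by
  unfold letter_to_number letter_to_number_alt
  rw [show PySem.List.pyRange 10 (lettersA.size * 10 + 10) 10 = [10,20,30,40,50,60,70,80] from by decide]
  cases hcs : letter.toList with
  | nil =>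
    simp [aStep, PySem.List.pyGet?_zero, ocnil]
  | cons c rest =>
    obtain ⟨lst, hl⟩ : ∃ x, PySem.List.pyGet? (c :: rest) (-1) = some x := by
      rw [PySem.List.pyGet?_neg_one]
      exact Option.isSome_iff_exists.mp (by simp [List.getLast?_isSome])
    by_cases hr : 'a' ≤ c ∧ c ≤ 'h'
    · rcases char_eight c hr.1 hr.2 with rfl|rfl|rfl|rfl|rfl|rfl|rfl|rfl <;>
        simp [aStep_cons, gd10, gd20, gd30, gd40, gd50, gd60, gd70, gd80,
              ts10, ts20, ts30, ts40, ts50, ts60, ts70, ts80, hl,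
              tc1, tc2, tc3, tc4, tc5, tc6, tc7, tc8]
    · have na : ('a':Char) ≠ c := by rintro rfl; exact hr (by decide)
      have nb : ('b':Char) ≠ c := by rintro rfl; exact hr (by decide)
      have nc : ('c':Char) ≠ c := by rintro rfl; exact hr (by decide)
      have nd : ('d':Char) ≠ c := by rintro rfl; exact hr (by decide)
      have ne' : ('e':Char) ≠ c := by rintro rfl; exact hr (by decide)
      have nf : ('f':Char) ≠ c := by rintro rfl; exact hr (by decide)
      have ng : ('g':Char) ≠ c := by rintro rfl; exact hr (by decide)
      have nh : ('h':Char) ≠ c := by rintro rfl; exact hr (by decide)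
      simp [aStep_cons, gd10, gd20, gd30, gd40, gd50, gd60, gd70, gd80,
            na, nb, nc, nd, ne', nf, ng, nh, hr,
            PySem.Int.ofStr?, hcs]

-- ===== VERDICT (by name: the statement is the Claim_ definition above) =====
theorem letter_to_number_spec : Claim_equal_letter_to_number := by
  intro letter _ _
  unfold Spec_letter_to_number
  exact core_eq letter
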